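-- pv_equiv track=rewrite | github.com/calico-team/calico-sp24 | frieren/submissions/accepted/frieren_simulation.py | solve
-- ===== SOURCE A (Python) =====
-- def solve(B: int, L: int, E: int) -> int:
--     """
--     Return the number of times the given person sees the Era Meteor Shower over the course of their life, it it occurs every fifty years.
--
--     B: the number of years ago when someone was born
--     L: the lifespan of that person
--     E: the number of years until the next Era Meteor Shower
--     """
--     age_at_first_shower = (E + B) % 50
--     total = 0
--
--     years_to_next_shower = age_at_first_shower
--     for _ in range(L + 1):
--         if years_to_next_shower % 50 == 0:
--             total += 1
--
--         years_to_next_shower = (years_to_next_shower - 1) % 50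
--
--     return total
-- ===== SOURCE B (Python) =====
-- def solve(B: int, L: int, E: int) -> int:
--     a = (E + B) % 50
--     if a > L:
--         return 0
--     return (L - a) // 50 + 1
-- ===== Notes on version B (the rewrite author's own statement) =====
-- stated objective: faster
-- what changed: Replaces the year-by-year simulation loop over the whole lifespan by a closed-form count of the indices in [0,L] congruent to (E+B) mod 50.
import Mathlib
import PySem

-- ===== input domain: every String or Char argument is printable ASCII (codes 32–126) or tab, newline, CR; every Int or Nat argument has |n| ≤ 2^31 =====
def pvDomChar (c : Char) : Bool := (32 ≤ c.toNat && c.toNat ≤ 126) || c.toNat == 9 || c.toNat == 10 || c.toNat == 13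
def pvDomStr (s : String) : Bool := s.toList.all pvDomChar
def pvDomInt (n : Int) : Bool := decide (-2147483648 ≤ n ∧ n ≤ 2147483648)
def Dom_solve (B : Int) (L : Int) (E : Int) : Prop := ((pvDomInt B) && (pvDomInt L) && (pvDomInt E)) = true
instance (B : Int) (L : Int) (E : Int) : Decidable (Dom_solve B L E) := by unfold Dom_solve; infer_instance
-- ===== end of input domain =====

-- B replaces A's year-by-year simulation loop with an O(1) closed-form count of indices in [0,L] congruent to (E+B) mod 50.


-- ===== PORT A =====
def solveStep (st : Int × Int) (_ : Int) : Int × Int :=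
  (if PySem.Int.mod st.2 50 == 0 then st.1 + 1 else st.1, PySem.Int.mod (st.2 - 1) 50)

def solve (B : Int) (L : Int) (E : Int) : Int :=
  let age_at_first_shower := PySem.Int.mod (E + B) 50
  ((PySem.List.pyRange 0 (L + 1) 1).foldl solveStep (0, age_at_first_shower)).1

-- ===== PORT B =====
def solve_alt (B : Int) (L : Int) (E : Int) : Int :=
  let a := PySem.Int.mod (E + B) 50
  if a > L then 0 else PySem.Int.floordiv (L - a) 50 + 1

-- ===== PRECONDITION & SPEC =====
def Spec_solve (B : Int) (L : Int) (E : Int) (out : Int) : Prop := out = solve_alt B L E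
instance (B : Int) (L : Int) (E : Int) (out : Int) : Decidable (Spec_solve B L E out) := by unfold Spec_solve; infer_instance

-- ===== CLAIM (what is proved, stated in full; the proofs are below) =====
def Claim_equal_solve : Prop := ∀ (B : Int) (L : Int) (E : Int), Dom_solve B L E → Spec_solve B L E (solve B L E)

-- ===== LEMMAS AND PROOFS =====

-- closed-form count of i ∈ [0,n) with i ≡ a (mod 50), for 0 ≤ a < 50
def cnt (a : Int) (n : Int) : Int :=
  if a < n then PySem.Int.floordiv (n - 1 - a) 50 + 1 else 0

theorem cnt_succ (a : Int) (ha0 : 0 ≤ a) (ha : a < 50) (n : Nat) :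
    cnt a ((n : Int) + 1) = cnt a (n : Int) + (if (a - (n : Int)) % 50 = 0 then 1 else 0) := by
  unfold cnt
  rw [PySem.Int.floordiv_eq_ediv_of_pos (by norm_num), PySem.Int.floordiv_eq_ediv_of_pos (by norm_num)]
  split_ifs <;> omega

-- loop invariant: after n iterations the state is (cnt a n, (a - n) mod 50)
theorem solve_loop_inv (a : Int) (ha0 : 0 ≤ a) (ha : a < 50) (n : Nat) :
    (PySem.List.pyRange 0 (n : Int) 1).foldl solveStep (0, a)
      = (cnt a n, PySem.Int.mod (a - n) 50) := by
  induction n with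
  | zero =>
      simp only [Nat.cast_zero]
      rw [PySem.List.pyRange_one_eq_nil (le_refl 0)]
      simp only [List.foldl_nil]
      rw [PySem.Int.mod_eq_emod_of_pos (by norm_num : (0:Int) < 50)]
      unfold cnt
      rw [if_neg (by omega)]
      simp only [Prod.mk.injEq]
      exact ⟨trivial, by omega⟩
  | succ n ih =>
      rw [show ((n + 1 : Nat) : Int) = (n : Int) + 1 from by push_cast; ring,
          PySem.List.pyRange_one_succ_right (by positivity), List.foldl_append, ih]
      simp only [List.foldl, solveStep,
        PySem.Int.mod_eq_emod_of_pos (by norm_num : (0:Int) < 50), beq_iff_eq, Prod.mk.injEq]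
      refine ⟨?_, by omega⟩
      have hdd : (a - (n : Int)) % 50 % 50 = (a - (n : Int)) % 50 := by omega
      rw [hdd, cnt_succ a ha0 ha n]
      split_ifs <;> omega

theorem solve_eq_alt (B L E : Int) : solve B L E = solve_alt B L E := by
  simp only [solve, solve_alt]
  set a := PySem.Int.mod (E + B) 50 with ha
  have ha0 : 0 ≤ a := by
    rw [ha, PySem.Int.mod_eq_emod_of_pos (by norm_num)]
    exact Int.emod_nonneg _ (by norm_num)
  have ha50 : a < 50 := by
    rw [ha, PySem.Int.mod_eq_emod_of_pos (by norm_num)]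
    exact Int.emod_lt_of_pos _ (by norm_num)
  by_cases hL : L + 1 ≤ 0
  · rw [PySem.List.pyRange_one_eq_nil hL]
    simp only [List.foldl_nil]
    rw [if_pos (by omega : a > L)]
  · have hn : ((L + 1).toNat : Int) = L + 1 := by omega
    rw [show PySem.List.pyRange 0 (L + 1) 1 = PySem.List.pyRange 0 ((L + 1).toNat : Int) 1 by rw [hn]]
    rw [solve_loop_inv a ha0 ha50 (L + 1).toNat]
    unfold cnt
    rw [hn]
    by_cases h : a > L
    · rw [if_neg (by omega : ¬ a < L + 1), if_pos h]
    · rw [if_pos (by omega : a < L + 1), if_neg h]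
      have h' : L + 1 - 1 - a = L - a := by ring
      rw [h']

-- ===== VERDICT (by name: the statement is the Claim_ definition above) =====
theorem solve_spec : Claim_equal_solve := by
  intro B L E _
  unfold Spec_solve
  exact solve_eq_alt B L E
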